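-- pv_equiv track=rewrite | github.com/yellalingh-margonda/Python-DSA | ARRAY/009_rearrange_sign.py | reArrangeSign
-- ===== SOURCE A (Python) =====
-- def reArrangeSign(arr,n):
--     res=[None]*len(arr)
--     pos=0
--     neg=1
--     for i in range(n):
--         if arr[i]>0:
--             res[pos]=arr[i]
--             pos+=2
--         else:
--             res[neg] = arr[i]
--             neg+=2
--     return res
-- ===== SOURCE B (Python) =====
-- def reArrangeSign(arr, n):
--     pos = [arr[i] for i in range(n) if arr[i] > 0]
--     neg = [arr[i] for i in range(n) if arr[i] <= 0]
--     res = [None] * len(arr)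
--     for i, x in enumerate(pos):
--         res[2 * i] = x
--     for i, x in enumerate(neg):
--         res[2 * i + 1] = x
--     return res
-- ===== Notes on version B (the rewrite author's own statement) =====
-- stated objective: simpler
-- what changed: Replaces the interleaved loop carrying two write cursors by a partition-then-scatter decomposition: collect positives and non-positives in one pass, then place them at even/odd indices.
import Mathlib
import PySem

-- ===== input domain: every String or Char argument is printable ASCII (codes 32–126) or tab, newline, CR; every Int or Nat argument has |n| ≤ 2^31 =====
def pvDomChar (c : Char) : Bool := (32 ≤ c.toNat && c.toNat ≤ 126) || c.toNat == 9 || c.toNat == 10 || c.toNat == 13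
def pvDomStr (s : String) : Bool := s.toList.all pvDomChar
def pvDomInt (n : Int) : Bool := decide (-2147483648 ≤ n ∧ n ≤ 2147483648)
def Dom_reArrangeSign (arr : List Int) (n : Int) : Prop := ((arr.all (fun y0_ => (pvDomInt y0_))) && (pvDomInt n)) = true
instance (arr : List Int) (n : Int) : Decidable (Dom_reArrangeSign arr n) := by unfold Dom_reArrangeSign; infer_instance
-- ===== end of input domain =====

-- B replaces A's interleaved loop with two write cursors by a partition-then-scatter
-- decomposition (collect positives / non-positives, then place them at even / odd slots); simpler, same cost.


-- ===== PORT A =====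
-- one loop step: read arr[i]; positive values go to the even cursor, others to the odd cursor
def raStep (arr : List Int) (st : List (Option Int) × Int × Int) (i : Int) :
    List (Option Int) × Int × Int :=
  if 0 < PySem.List.pyGetD arr i 0 then
    (PySem.List.pySetD st.1 st.2.1 (some (PySem.List.pyGetD arr i 0)), st.2.1 + 2, st.2.2)
  else
    (PySem.List.pySetD st.1 st.2.2 (some (PySem.List.pyGetD arr i 0)), st.2.1, st.2.2 + 2)

def reArrangeSign (arr : List Int) (n : Int) : List (Option Int) :=
  ((PySem.List.pyRange 0 n 1).foldl (raStep arr) (List.replicate arr.length none, 0, 1)).1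

-- ===== PORT B =====
-- place the k-th element of l at index 2*k of res
def scatterEven (res : List (Option Int)) (l : List Int) : List (Option Int) :=
  (PySem.List.enumerate l).foldl (fun r p => PySem.List.pySetD r (2 * p.1) (some p.2)) res

-- place the k-th element of l at index 2*k+1 of res
def scatterOdd (res : List (Option Int)) (l : List Int) : List (Option Int) :=
  (PySem.List.enumerate l).foldl (fun r p => PySem.List.pySetD r (2 * p.1 + 1) (some p.2)) res

def reArrangeSign_alt (arr : List Int) (n : Int) : List (Option Int) :=
  let vals := (PySem.List.pyRange 0 n 1).map (fun i => PySem.List.pyGetD arr i 0)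
  let pos := vals.filter (fun v => decide (0 < v))
  let neg := vals.filter (fun v => decide (v ≤ 0))
  scatterOdd (scatterEven (List.replicate arr.length none) pos) neg

-- ===== PRECONDITION & SPEC =====
-- Pre_ excludes exactly the inputs on which the Python A raises IndexError:
-- n beyond len(arr), or so many positives (resp. non-positives) among the first n
-- elements that a strided write res[pos] / res[neg] falls past the end of res.
def Pre_reArrangeSign (arr : List Int) (n : Int) : Prop :=
  n ≤ (arr.length : Int) ∧
  2 * ((arr.take n.toNat).filter (fun v => decide (0 < v))).length ≤ arr.length + 1 ∧
  2 * ((arr.take n.toNat).filter (fun v => decide (v ≤ 0))).length ≤ arr.length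
instance (arr : List Int) (n : Int) : Decidable (Pre_reArrangeSign arr n) := by
  unfold Pre_reArrangeSign; infer_instance

def pvWitness_reArrangeSign : List Int × Int := ([1, -2, 3], 3)

def Spec_reArrangeSign (arr : List Int) (n : Int) (out : List (Option Int)) : Prop := out = reArrangeSign_alt arr n
instance (arr : List Int) (n : Int) (out : List (Option Int)) : Decidable (Spec_reArrangeSign arr n out) := by unfold Spec_reArrangeSign; infer_instance

-- ===== CLAIM (what is proved, stated in full; the proofs are below) =====
def Claim_equal_reArrangeSign : Prop := ∀ (arr : List Int) (n : Int), Dom_reArrangeSign arr n → Pre_reArrangeSign arr n → Spec_reArrangeSign arr n (reArrangeSign arr n)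

-- ===== LEMMAS AND PROOFS =====

-- range(0, n) is range(0, max(n,0))
lemma pyRange_toNat (n : Int) :
    PySem.List.pyRange 0 n 1 = PySem.List.pyRange 0 ((n.toNat : Int)) 1 := by
  by_cases h : 0 ≤ n
  · rw [Int.toNat_of_nonneg h]
  · rw [PySem.List.pyRange_one_eq_nil (by omega), PySem.List.pyRange_one_eq_nil (by omega)]

-- reading arr[i] over range(k) is the prefix arr[:k]
lemma map_pyGetD_range_take (arr : List Int) (k : Nat) (hk : k ≤ arr.length) :
    (PySem.List.pyRange 0 (k : Int) 1).map (fun i => PySem.List.pyGetD arr i 0) = arr.take k := by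
  induction k with
  | zero => simp [PySem.List.pyRange_one_eq_nil]
  | succ m ih =>
      have hm : m < arr.length := by omega
      rw [show ((m + 1 : Nat) : Int) = (m : Int) + 1 by push_cast; ring,
        PySem.List.pyRange_one_succ_right (by positivity), List.map_append,
        ih (by omega), List.take_add_one]
      simp [PySem.List.pyGetD_ofNat arr m 0 hm, List.getElem?_eq_getElem hm]

lemma enumerate_append_singleton {α : Type} (l : List α) (v : α) (s : Int) :
    PySem.List.enumerate (l ++ [v]) s = PySem.List.enumerate l s ++ [(s + l.length, v)] := by
  induction l generalizing s with
  | nil => simp [PySem.List.enumerate_cons, PySem.List.enumerate_nil]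
  | cons x xs ih =>
      simp only [List.cons_append, PySem.List.enumerate_cons, ih, List.length_cons]
      congr 1
      simp
      omega

-- writes at distinct nonnegative indices commute
lemma pySetD_comm (r : List (Option Int)) (i j : Int) (hi : 0 ≤ i) (hj : 0 ≤ j) (hij : i ≠ j)
    (v w : Option Int) :
    PySem.List.pySetD (PySem.List.pySetD r i v) j w
    = PySem.List.pySetD (PySem.List.pySetD r j w) i v := by
  rw [PySem.List.pySetD_of_nonneg r v hi, PySem.List.pySetD_of_nonneg _ w hj,
    PySem.List.pySetD_of_nonneg r w hj, PySem.List.pySetD_of_nonneg _ v hi]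
  exact List.set_comm _ _ (by omega)

-- a write at an even index commutes with all the odd-index writes of scatterOdd
lemma scatterOdd_go_set (l : List Int) (s : Int) (hs : 0 ≤ s) (r : List (Option Int))
    (a : Nat) (v : Option Int) :
    (PySem.List.enumerate l s).foldl (fun r p => PySem.List.pySetD r (2 * p.1 + 1) (some p.2))
        (PySem.List.pySetD r (2 * (a : Int)) v)
    = PySem.List.pySetD
        ((PySem.List.enumerate l s).foldl (fun r p => PySem.List.pySetD r (2 * p.1 + 1) (some p.2)) r)
        (2 * (a : Int)) v := by
  induction l generalizing r s with
  | nil => simp [PySem.List.enumerate_nil]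
  | cons x xs ih =>
      rw [PySem.List.enumerate_cons]
      simp only [List.foldl_cons]
      rw [pySetD_comm r (2 * (a : Int)) (2 * s + 1) (by positivity) (by omega) (by omega)]
      exact ih (s + 1) (by omega) _

lemma scatterOdd_pySetD_even (res : List (Option Int)) (l : List Int) (a : Nat) (v : Option Int) :
    scatterOdd (PySem.List.pySetD res (2 * (a : Int)) v) l
    = PySem.List.pySetD (scatterOdd res l) (2 * (a : Int)) v := by
  unfold scatterOdd
  exact scatterOdd_go_set l 0 le_rfl res a v

lemma scatterEven_snoc (res : List (Option Int)) (l : List Int) (v : Int) :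
    scatterEven res (l ++ [v])
    = PySem.List.pySetD (scatterEven res l) (2 * (l.length : Int)) (some v) := by
  unfold scatterEven
  rw [enumerate_append_singleton, List.foldl_append]
  simp

lemma scatterOdd_snoc (res : List (Option Int)) (l : List Int) (v : Int) :
    scatterOdd res (l ++ [v])
    = PySem.List.pySetD (scatterOdd res l) (2 * (l.length : Int) + 1) (some v) := by
  unfold scatterOdd
  rw [enumerate_append_singleton, List.foldl_append]
  simp

-- loop invariant: after processing range(k), A's state is B's partition-scatter of arr[:k]
-- with cursors 2*|pos| and 2*|neg|+1
lemma loop_inv (arr : List Int) (k : Nat) (hk : k ≤ arr.length) :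
    (PySem.List.pyRange 0 (k : Int) 1).foldl (raStep arr) (List.replicate arr.length none, 0, 1)
    = (scatterOdd (scatterEven (List.replicate arr.length none)
          ((arr.take k).filter (fun v => decide (0 < v))))
          ((arr.take k).filter (fun v => decide (v ≤ 0))),
       2 * (((arr.take k).filter (fun v => decide (0 < v))).length : Int),
       2 * (((arr.take k).filter (fun v => decide (v ≤ 0))).length : Int) + 1) := by
  induction k with
  | zero =>
      simp [PySem.List.pyRange_one_eq_nil, scatterEven, scatterOdd, PySem.List.enumerate_nil]
  | succ m ih =>
      have hm : m < arr.length := by omega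
      rw [show ((m + 1 : Nat) : Int) = (m : Int) + 1 by push_cast; ring,
        PySem.List.pyRange_one_succ_right (by positivity), List.foldl_append,
        ih (by omega), List.take_add_one, List.getElem?_eq_getElem hm]
      simp only [List.foldl_cons, List.foldl_nil, Option.toList_some, List.filter_append]
      unfold raStep
      rw [PySem.List.pyGetD_ofNat arr m 0 hm]
      by_cases hv : 0 < arr[m]
      · rw [if_pos hv]
        simp only [List.filter_cons, List.filter_nil, decide_eq_true hv,
          show (decide (arr[m] ≤ 0)) = false by simpa using hv, if_true, if_false,
          Bool.false_eq_true, List.append_nil]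
        rw [scatterEven_snoc, scatterOdd_pySetD_even]
        refine Prod.ext (by simp) (Prod.ext (by simp; omega) (by simp))
      · have hv' : arr[m] ≤ 0 := by omega
        rw [if_neg hv]
        simp only [List.filter_cons, List.filter_nil,
          show (decide (0 < arr[m])) = false by simpa using hv,
          decide_eq_true hv', if_true, if_false, Bool.false_eq_true, List.append_nil]
        rw [scatterOdd_snoc]
        refine Prod.ext (by simp) (Prod.ext (by simp) (by simp; omega))

-- ===== VERDICT (by name: the statement is the Claim_ definition above) =====
theorem reArrangeSign_spec : Claim_equal_reArrangeSign := by
  intro arr n _ hpre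
  obtain ⟨hn, _, _⟩ := hpre
  have hk : n.toNat ≤ arr.length := by omega
  unfold Spec_reArrangeSign reArrangeSign reArrangeSign_alt
  rw [pyRange_toNat, loop_inv arr n.toNat hk, map_pyGetD_range_take arr n.toNat hk]
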